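-- pv_equiv track=rewrite | github.com/stay-out-of-it/Codility | Challenges/FuryRoad.py | solution
-- ===== SOURCE A (Python) =====
-- def solution(R):
--     A = 20
--     S = 30
--     As = 5
--     Ss = 40
--
--     start_i = len(R)-len(R.lstrip("A"))
--     end_i = len(R)-len(R.rstrip("S"))
--     start_v = start_i * As
--     end_v = end_i * S
--     min_v = start_v
--     alt_v = start_v
--     for i in R[start_i: len(R.rstrip("S"))]:
--         if i == "S":
--             min_v += S
--             alt_v += Ss
--         else:
--             min_v += A
--             alt_v += As
--         if min_v > alt_v:
--             min_v = alt_v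
--
--     min_v += end_v
--     return min_v
-- ===== SOURCE B (Python) =====
-- def solution(R):
--     # Split-point formulation: answer = start_v + min over switch points j of
--     # (alt-cost prefix j + normal-cost suffix after j) + end_v.
--     n = len(R)
--     start_i = n - len(R.lstrip("A"))
--     end_len = len(R.rstrip("S"))
--     start_v = start_i * 5
--     end_v = (n - end_len) * 30
--     mid = R[start_i:end_len]
--     norm = [30 if c == "S" else 20 for c in mid]
--     alt = [40 if c == "S" else 5 for c in mid]
--     total = sum(norm)
--     best = total
--     alt_pref = 0
--     norm_pref = 0
--     for a, nc in zip(alt, norm):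
--         alt_pref += a
--         norm_pref += nc
--         cand = alt_pref + total - norm_pref
--         if cand < best:
--             best = cand
--     return start_v + best + end_v
-- ===== Notes on version B (the rewrite author's own statement) =====
-- stated objective: alternative
-- what changed: Replaces A's running two-track DP (min_v/alt_v updated per character) by a prefix-sum formulation: compute total normal cost once, then scan split points taking min(alt_prefix + normal_total - normal_prefix); the DP state and its per-step min disappear.
import Mathlib
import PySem

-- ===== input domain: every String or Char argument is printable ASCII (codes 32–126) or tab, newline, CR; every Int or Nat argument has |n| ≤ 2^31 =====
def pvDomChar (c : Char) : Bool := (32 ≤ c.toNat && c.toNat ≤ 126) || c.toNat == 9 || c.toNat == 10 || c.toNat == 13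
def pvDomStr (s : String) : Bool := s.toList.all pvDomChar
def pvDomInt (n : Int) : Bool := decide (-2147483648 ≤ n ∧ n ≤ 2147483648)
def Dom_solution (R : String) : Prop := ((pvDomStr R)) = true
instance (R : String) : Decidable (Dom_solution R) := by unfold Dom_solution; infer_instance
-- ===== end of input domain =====

-- B replaces A's running two-track DP by a prefix-sum/split-point minimum (alternative decomposition, same cost).

-- ===== PORT A =====
-- A's loop: min_v/alt_v DP over the trimmed region
def solLoopA : List Char → Int → Int → Int × Int
  | [], min_v, alt_v => (min_v, alt_v)
  | c :: t, min_v, alt_v =>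
    let m1 := if c = 'S' then min_v + 30 else min_v + 20
    let a1 := if c = 'S' then alt_v + 40 else alt_v + 5
    let m2 := if m1 > a1 then a1 else m1
    solLoopA t m2 a1

def solution (R : String) : Int :=
  let cs := R.toList
  -- R.lstrip("A") / R.rstrip("S"): one-char-set strips, ported by hand as dropWhile (exact)
  let start_i : Int := (cs.length : Int) - ((cs.dropWhile (· == 'A')).length : Int)
  let rlen : Int := ((cs.reverse.dropWhile (· == 'S')).length : Int)
  let end_i : Int := (cs.length : Int) - rlen
  let start_v := start_i * 5
  let end_v := end_i * 30
  let mid := PySem.List.slice cs (some start_i) (some rlen)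
  let p := solLoopA mid start_v start_v
  p.1 + end_v

-- ===== PORT B =====
-- B's loop: best split point over prefix sums of (alt, normal) costs
def solLoopB : List (Int × Int) → Int → Int → Int → Int → Int
  | [], best, _, _, _ => best
  | (a, nc) :: t, best, alt_pref, norm_pref, total =>
    let ap1 := alt_pref + a
    let np1 := norm_pref + nc
    let cand := ap1 + total - np1
    let best1 := if cand < best then cand else best
    solLoopB t best1 ap1 np1 total

def solution_alt (R : String) : Int :=
  let cs := R.toList
  -- R.lstrip("A") / R.rstrip("S"): one-char-set strips, ported by hand as dropWhile (exact)
  let start_i : Int := (cs.length : Int) - ((cs.dropWhile (· == 'A')).length : Int)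
  let endLen : Int := ((cs.reverse.dropWhile (· == 'S')).length : Int)
  let start_v := start_i * 5
  let end_v := ((cs.length : Int) - endLen) * 30
  let mid := PySem.List.slice cs (some start_i) (some endLen)
  let norm := mid.map (fun c => if c = 'S' then (30 : Int) else 20)
  let alt := mid.map (fun c => if c = 'S' then (40 : Int) else 5)
  let total := norm.sum
  start_v + solLoopB (alt.zip norm) total 0 0 total + end_v

-- ===== PRECONDITION & SPEC =====
def Spec_solution (R : String) (out : Int) : Prop := out = solution_alt R
instance (R : String) (out : Int) : Decidable (Spec_solution R out) := by unfold Spec_solution; infer_instance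

-- ===== CLAIM (what is proved, stated in full; the proofs are below) =====
def Claim_equal_solution : Prop := ∀ (R : String), Dom_solution R → Spec_solution R (solution R)

-- ===== LEMMAS AND PROOFS =====

-- normal-cost sum of a char list
def nSum (l : List Char) : Int := (l.map (fun c => if c = 'S' then (30 : Int) else 20)).sum

-- kMin l = min over nonempty prefixes taken at alt cost, remainder at normal cost
def kMin : List Char → Int
  | [] => 0
  | c :: t => (if c = 'S' then (40 : Int) else 5) + min (nSum t) (kMin t)

def mDiff : List (Int × Int) → Int
  | [] => 0
  | (a, nc) :: t => (a - nc) + min 0 (mDiff t)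

theorem nSum_cons (c : Char) (t : List Char) :
    nSum (c :: t) = (if c = 'S' then (30 : Int) else 20) + nSum t := by
  simp [nSum]

theorem solLoopA_fst (l : List Char) : ∀ m a : Int, m ≤ a →
    (solLoopA l m a).1 = min (m + nSum l) (a + kMin l) := by
  induction l with
  | nil => intro m a h; simp only [solLoopA, nSum, kMin, List.map_nil, List.sum_nil]; omega
  | cons c t ih =>
    intro m a h
    by_cases hc : c = 'S' <;>
      simp only [solLoopA, nSum_cons, kMin, hc, ite_true, ite_false, reduceIte] <;>
      split_ifs with hgt <;> rw [ih _ _ (by omega)] <;> omega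

theorem solLoopB_eq (l : List (Int × Int)) : ∀ best ap np total : Int,
    best ≤ ap + total - np →
    solLoopB l best ap np total = min best (ap + total - np + mDiff l) := by
  induction l with
  | nil => intro best ap np total h; simp only [solLoopB, mDiff]; omega
  | cons p t ih =>
    intro best ap np total h
    obtain ⟨a, nc⟩ := p
    simp only [solLoopB, mDiff]
    split_ifs with hlt <;> rw [ih _ _ _ _ (by omega)] <;> omega

theorem mDiff_zip (l : List Char) :
    mDiff ((l.map (fun c => if c = 'S' then (40 : Int) else 5)).zip
           (l.map (fun c => if c = 'S' then (30 : Int) else 20)))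
      = kMin l - nSum l := by
  induction l with
  | nil => simp [mDiff, nSum, kMin]
  | cons c t ih =>
    by_cases hc : c = 'S' <;>
      simp only [List.map_cons, List.zip_cons_cons, mDiff, kMin, nSum_cons, hc,
        ite_true, ite_false, reduceIte] <;> rw [ih] <;> omega

-- A's DP result and B's split-point result coincide on any list and start value
theorem core (l : List Char) (m e : Int) :
    (solLoopA l m m).1 + e
      = m + solLoopB ((l.map (fun c => if c = 'S' then (40 : Int) else 5)).zip
                      (l.map (fun c => if c = 'S' then (30 : Int) else 20)))
              (nSum l) 0 0 (nSum l) + e := by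
  rw [solLoopA_fst l m m (le_refl m),
      solLoopB_eq _ _ _ _ _ (by omega),
      mDiff_zip l]
  omega

-- ===== VERDICT (by name: the statement is the Claim_ definition above) =====
theorem solution_spec : Claim_equal_solution := by
  intro R _
  show solution R = solution_alt R
  exact core
    (PySem.List.slice R.toList
      (some ((R.toList.length : Int) - ((R.toList.dropWhile (· == 'A')).length : Int)))
      (some ((R.toList.reverse.dropWhile (· == 'S')).length : Int)))
    (((R.toList.length : Int) - ((R.toList.dropWhile (· == 'A')).length : Int)) * 5)
    (((R.toList.length : Int) - ((R.toList.reverse.dropWhile (· == 'S')).length : Int)) * 30)
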